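-- pv_equiv track=rewrite | github.com/AnshuExodus/Web-Scraper-Empyrean | unit-tests/file-spider/list-filenames.py | cleanMovieName_leftSide
-- ===== SOURCE A (Python) =====
-- def cleanMovieName_leftSide(movieStr):
--     movieStr = movieStr.lstrip()
--     if(movieStr[0] == '['):
--         movieStr = movieStr[movieStr.find(']') + 1:]
--         movieStr = cleanMovieName_leftSide(movieStr)
--     if(movieStr[0] == '('):
--         movieStr = movieStr[movieStr.find(')') + 1:]
--         movieStr = cleanMovieName_leftSide(movieStr)
--     if(movieStr[0] == '-'):
--         movieStr = movieStr[movieStr.find('-') + 1:]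
--         movieStr = cleanMovieName_leftSide(movieStr)
--     return movieStr
-- ===== SOURCE B (Python) =====
-- def cleanMovieName_leftSide(movieStr):
--     i = 0
--     n = len(movieStr)
--     while i < n:
--         c = movieStr[i]
--         if c.isspace():
--             i += 1
--         elif c == '[':
--             j = movieStr.find(']', i)
--             if j == -1:
--                 break
--             i = j + 1
--         elif c == '(':
--             j = movieStr.find(')', i)
--             if j == -1:
--                 break
--             i = j + 1
--         elif c == '-':
--             i += 1
--         else:
--             break
--     return movieStr[i:]
-- ===== Notes on version B (the rewrite author's own statement) =====
-- stated objective: alternative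
-- what changed: A's recursion (lstrip, then three sequential strip-and-recurse ifs, each allocating sliced strings at every level) is replaced by a single flat while-loop that advances an index pointer over the original string and slices exactly once at the end.
import Mathlib
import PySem

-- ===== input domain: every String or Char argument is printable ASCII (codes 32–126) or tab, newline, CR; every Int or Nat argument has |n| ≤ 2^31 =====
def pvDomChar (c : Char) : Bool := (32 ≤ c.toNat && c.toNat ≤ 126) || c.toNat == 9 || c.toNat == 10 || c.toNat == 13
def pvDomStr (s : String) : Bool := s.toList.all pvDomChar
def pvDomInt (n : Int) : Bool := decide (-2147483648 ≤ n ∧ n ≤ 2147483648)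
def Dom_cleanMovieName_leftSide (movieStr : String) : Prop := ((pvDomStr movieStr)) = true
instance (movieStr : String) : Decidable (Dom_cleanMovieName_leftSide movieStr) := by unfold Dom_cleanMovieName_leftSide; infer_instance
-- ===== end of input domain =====

-- B replaces A's recursion (three sequential strip-and-recurse ifs, each building sliced strings)
-- by a single flat scan with an index pointer that slices once at the end; equivalence is about the
-- return value only (neither version mutates anything observable).

-- ===== PORT A =====
-- Literal transliteration of A's recursion. Python's unbounded recursion is made total with a fuel
-- parameter (length+1 suffices on every input Pre_ admits, proved below); fuel exhaustion happens
-- only where Python A recurses forever into a RecursionError, which Pre_ excludes.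
-- s.find(']') (single-char needle, Int result) is PySem.Chars.find; s[k:] is PySem.List.slice;
-- s[0] is PySem.List.pyGet? (none where Python raises IndexError; Pre_ excludes those inputs,
-- the port's `= some _` conditions are simply false there); .lstrip() is PySem.Chars.lstrip.
def cleanA : Nat → List Char → List Char
  | 0, cs => cs
  | f+1, cs =>
    let m1 := PySem.Chars.lstrip cs
    let m2 := if PySem.List.pyGet? m1 0 = some '[' then
        cleanA f (PySem.List.slice m1 (some (PySem.Chars.find m1 [']'] + 1)) none) else m1
    let m3 := if PySem.List.pyGet? m2 0 = some '(' then
        cleanA f (PySem.List.slice m2 (some (PySem.Chars.find m2 [')'] + 1)) none) else m2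
    let m4 := if PySem.List.pyGet? m3 0 = some '-' then
        cleanA f (PySem.List.slice m3 (some (PySem.Chars.find m3 ['-'] + 1)) none) else m3
    m4

def cleanMovieName_leftSide (movieStr : String) : String :=
  String.ofList (cleanA (movieStr.toList.length + 1) movieStr.toList)

-- ===== PORT B =====
-- B's while-loop over an index i. The loop is made total with a fuel parameter (cs.length iterations
-- suffice, since i strictly increases; proved below); Python's c.isspace() is PySem.Chars.isspace,
-- s.find(c, i) is PySem.Chars.findFrom.
def bLoop (cs : List Char) : Nat → Nat → Nat
  | 0, i => i
  | fuel+1, i =>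
    if h : i < cs.length then
      let c := cs[i]
      if PySem.Chars.isspace c then bLoop cs fuel (i+1)
      else if c = '[' then
        let j := PySem.Chars.findFrom cs [']'] (i : Int)
        if j = -1 then i else bLoop cs fuel (j.toNat + 1)
      else if c = '(' then
        let j := PySem.Chars.findFrom cs [')'] (i : Int)
        if j = -1 then i else bLoop cs fuel (j.toNat + 1)
      else if c = '-' then bLoop cs fuel (i+1)
      else i
    else i

def cleanMovieName_leftSide_alt (movieStr : String) : String :=
  let cs := movieStr.toList
  String.ofList (PySem.List.slice cs (some ((bLoop cs cs.length 0 : Nat) : Int)) none)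

-- ===== PRECONDITION & SPEC =====
-- The grammar condition for A to return: scanning left to right, every whitespace/'-' is skipped,
-- every '[' / '(' opened during the scan is closed later, and a normal character is eventually
-- reached. Exactly where it fails Python A raises (IndexError on a string that is empty or fully
-- consumed, RecursionError on an unclosed '[' / '('). Structural state machine, no fuel:
-- the state is the bracket-close character currently being sought (none = top level).
def pvPreAux : Option Char → List Char → Bool
  | none, [] => false
  | some _, [] => false
  | none, c :: cs =>
      if PySem.Chars.isspace c then pvPreAux none cs
      else if c = '[' then pvPreAux (some ']') cs
      else if c = '(' then pvPreAux (some ')') cs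
      else if c = '-' then pvPreAux none cs
      else true
  | some t, c :: cs => if c = t then pvPreAux none cs else pvPreAux (some t) cs

def Pre_cleanMovieName_leftSide (movieStr : String) : Prop :=
  pvPreAux none movieStr.toList = true
instance (movieStr : String) : Decidable (Pre_cleanMovieName_leftSide movieStr) := by
  unfold Pre_cleanMovieName_leftSide; infer_instance

def pvWitness_cleanMovieName_leftSide : String := " [HD] (2019) - Spirited Away"

def Spec_cleanMovieName_leftSide (movieStr : String) (out : String) : Prop := out = cleanMovieName_leftSide_alt movieStr
instance (movieStr : String) (out : String) : Decidable (Spec_cleanMovieName_leftSide movieStr out) := by unfold Spec_cleanMovieName_leftSide; infer_instance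

-- ===== CLAIM (what is proved, stated in full; the proofs are below) =====
def Claim_equal_cleanMovieName_leftSide : Prop := ∀ (movieStr : String), Dom_cleanMovieName_leftSide movieStr → Pre_cleanMovieName_leftSide movieStr → Spec_cleanMovieName_leftSide movieStr (cleanMovieName_leftSide movieStr)


-- ===== LEMMAS AND PROOFS =====

-- first index of a character, proof-side helper
def pvFindIdx? (c : Char) : List Char → Option Nat
  | [] => none
  | d :: cs => if d = c then some 0 else (pvFindIdx? c cs).map (· + 1)

-- canonical drop-based form both ports are reduced to
def listClean : List Char → List Char
  | [] => []
  | c :: cs =>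
    if PySem.Chars.isspace c then listClean cs
    else if c = '[' then
      match pvFindIdx? ']' cs with
      | some k => listClean (cs.drop (k+1))
      | none => c :: cs
    else if c = '(' then
      match pvFindIdx? ')' cs with
      | some k => listClean (cs.drop (k+1))
      | none => c :: cs
    else if c = '-' then listClean cs
    else c :: cs
  termination_by cs => cs.length
  decreasing_by all_goals (simp [List.length_drop]; try omega)

theorem pvFindIdx?_none (c : Char) (l : List Char) :
    pvFindIdx? c l = none ↔ c ∉ l := by
  induction l with
  | nil => simp [pvFindIdx?]
  | cons d t ih =>
    by_cases hd : d = c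
    · simp [pvFindIdx?, hd]
    · simp [pvFindIdx?, hd, ih]
      exact fun _ hcd => hd hcd.symm

theorem pvFindIdx?_some (c : Char) (l : List Char) (k : Nat)
    (h : pvFindIdx? c l = some k) :
    l[k]? = some c ∧ ∀ i, i < k → l[i]? ≠ some c := by
  induction l generalizing k with
  | nil => simp [pvFindIdx?] at h
  | cons d t ih =>
    by_cases hd : d = c
    · simp [pvFindIdx?, hd] at h
      subst hd; subst h; simp
    · simp [pvFindIdx?, hd] at h
      obtain ⟨k', hk', rfl⟩ := h
      obtain ⟨h1, h2⟩ := ih k' hk'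
      refine ⟨by simpa using h1, ?_⟩
      intro i hi
      cases i with
      | zero => simp [hd]
      | succ i => simpa using h2 i (by omega)

theorem singleton_prefix_head (c : Char) (m : List Char) :
    [c] <+: m ↔ m.head? = some c := by
  cases m with
  | nil => simp
  | cons d t => simp [List.cons_prefix_cons, eq_comm]

theorem find_single (c : Char) (l : List Char) :
    PySem.Chars.find l [c] =
      (match pvFindIdx? c l with | none => (-1 : Int) | some k => (k : Int)) := by
  cases h : pvFindIdx? c l with
  | none =>
    show PySem.Chars.find l [c] = -1
    rw [PySem.Chars.find_eq_neg_one_iff, List.singleton_infix_iff]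
    exact (pvFindIdx?_none c l).mp h
  | some k =>
    show PySem.Chars.find l [c] = (k : Int)
    obtain ⟨h1, h2⟩ := pvFindIdx?_some c l k h
    have hmem : c ∈ l := List.mem_of_getElem? h1
    have hne : PySem.Chars.find l [c] ≠ -1 := by
      rw [Ne, PySem.Chars.find_eq_neg_one_iff, List.singleton_infix_iff]; simp [hmem]
    have hff : PySem.Chars.findFrom l [c] ((0 : Nat) : Int) = PySem.Chars.find l [c] := by
      rw [show ((0 : Nat) : Int) = (0 : Int) by norm_num, PySem.Chars.findFrom_zero]
    have hspec := PySem.Chars.findFrom_natCast_spec l [c] 0 (Nat.zero_le _) (by rw [hff]; exact hne)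
    rw [hff] at hspec
    obtain ⟨hle, hpre, hmin⟩ := hspec
    have hFnn : (0 : Int) ≤ PySem.Chars.find l [c] := by simpa using hle
    have hFget : l[(PySem.Chars.find l [c]).toNat]? = some c := by
      have := (singleton_prefix_head c (l.drop (PySem.Chars.find l [c]).toNat)).mp hpre
      simpa [List.head?_drop] using this
    have h1' : [c] <+: l.drop k := by
      rw [singleton_prefix_head, List.head?_drop]; exact h1
    have hA : ¬ (PySem.Chars.find l [c]).toNat < k := fun hlt => (h2 _ hlt) hFget
    have hB : ¬ k < (PySem.Chars.find l [c]).toNat := fun hlt =>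
      (hmin k (Nat.zero_le _) hlt) h1'
    omega

theorem pyGet?_zero (l : List Char) : PySem.List.pyGet? l 0 = l.head? := by
  simp [PySem.List.pyGet?, PySem.List.pyIdx?]
  split <;> simp_all [List.head?_eq_getElem?, List.length_pos_iff]

theorem lstrip_eq (cs : List Char) :
    PySem.Chars.lstrip cs = cs.dropWhile PySem.Chars.isspace := by
  simp [PySem.Chars.lstrip]

theorem pvPreAux_some (t : Char) (cs : List Char) :
    pvPreAux (some t) cs =
      (match pvFindIdx? t cs with
       | none => false
       | some k => pvPreAux none (cs.drop (k+1))) := by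
  induction cs with
  | nil => simp [pvPreAux, pvFindIdx?]
  | cons c cs ih =>
    by_cases hc : c = t
    · simp [pvPreAux, pvFindIdx?, hc]
    · simp only [pvPreAux, pvFindIdx?, if_neg hc, ih]
      cases h : pvFindIdx? t cs <;> simp

theorem preAux_dropWhile (cs : List Char) :
    pvPreAux none (cs.dropWhile PySem.Chars.isspace) = pvPreAux none cs := by
  induction cs with
  | nil => simp
  | cons c cs ih =>
    by_cases hc : PySem.Chars.isspace c
    · simpa [List.dropWhile_cons, hc, pvPreAux] using ih
    · simp [hc]

theorem listClean_dropWhile (cs : List Char) :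
    listClean (cs.dropWhile PySem.Chars.isspace) = listClean cs := by
  induction cs with
  | nil => simp
  | cons c cs ih =>
    by_cases hc : PySem.Chars.isspace c
    · rw [List.dropWhile_cons, if_pos hc, ih]
      simp [listClean, hc]
    · rw [List.dropWhile_cons, if_neg hc]

theorem isspace_lbrack : PySem.Chars.isspace '[' = false := by decide
theorem isspace_lparen : PySem.Chars.isspace '(' = false := by decide
theorem isspace_dash : PySem.Chars.isspace '-' = false := by decide

theorem head_good : ∀ (cs : List Char), pvPreAux none cs = true → ∀ (d : Char),
    (listClean cs).head? = some d →
    PySem.Chars.isspace d = false ∧ d ≠ '[' ∧ d ≠ '(' ∧ d ≠ '-' := by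
  intro cs
  induction cs using listClean.induct with
  | case1 => intro _ d hd; simp [listClean] at hd
  | case2 c cs hc ih =>
    intro hpre d hd
    rw [listClean, if_pos hc] at hd
    exact ih (by simpa [pvPreAux, hc] using hpre) d hd
  | case3 cs k hk hc ih =>
    intro hpre d hd
    have hpre' : pvPreAux (some ']') cs = true := by
      simpa [pvPreAux, isspace_lbrack] using hpre
    rw [pvPreAux_some, hk] at hpre'
    rw [listClean] at hd
    simp only [isspace_lbrack, Bool.false_eq_true, if_false, hk] at hd
    exact ih hpre' d hd
  | case4 cs hk hc =>
    intro hpre d hd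
    have hpre' : pvPreAux (some ']') cs = true := by
      simpa [pvPreAux, isspace_lbrack] using hpre
    rw [pvPreAux_some, hk] at hpre'
    simp at hpre'
  | case5 cs k hk hc hne1 ih =>
    intro hpre d hd
    have hpre' : pvPreAux (some ')') cs = true := by
      simpa [pvPreAux, isspace_lparen] using hpre
    rw [pvPreAux_some, hk] at hpre'
    rw [listClean] at hd
    simp only [isspace_lparen, Bool.false_eq_true, if_false, hk] at hd
    simp at hd
    exact ih hpre' d hd
  | case6 cs hk hc hne1 =>
    intro hpre d hd
    have hpre' : pvPreAux (some ')') cs = true := by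
      simpa [pvPreAux, isspace_lparen] using hpre
    rw [pvPreAux_some, hk] at hpre'
    simp at hpre'
  | case7 cs hc hne1 hne2 ih =>
    intro hpre d hd
    rw [listClean] at hd
    simp only [isspace_dash, Bool.false_eq_true, if_false] at hd
    simp at hd
    exact ih (by simpa [pvPreAux, isspace_dash] using hpre) d hd
  | case8 c cs hc h1 h2 h3 =>
    intro hpre d hd
    rw [listClean, if_neg (by simpa using hc), if_neg h1, if_neg h2, if_neg h3] at hd
    simp at hd
    obtain ⟨rfl, -⟩ := hd
    refine ⟨by simpa using hc, h1, h2, h3⟩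

theorem dropWhile_head_false {p : Char → Bool} {c : Char} :
    ∀ (l : List Char), (l.dropWhile p).head? = some c → p c = false := by
  intro l h
  induction l with
  | nil => simp at h
  | cons d t ih =>
    by_cases hd : p d
    · exact ih (by simpa [List.dropWhile_cons, hd] using h)
    · rw [List.dropWhile_cons, if_neg hd] at h
      simp at h
      obtain ⟨rfl, -⟩ := h
      simpa using hd

theorem slice_from_nat (cs : List Char) (k : Nat) :
    PySem.List.slice cs (some ((k : Int))) none = cs.drop k := by
  exact PySem.List.slice_from_natCast cs k

theorem cleanA_eq : ∀ (f : Nat) (cs : List Char), pvPreAux none cs = true →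
    cs.length < f → cleanA f cs = listClean cs := by
  intro f
  induction f with
  | zero => intro cs _ h; omega
  | succ f ih =>
    intro cs hpre hlen
    have hm1len : (cs.dropWhile PySem.Chars.isspace).length ≤ cs.length :=
      List.length_dropWhile_le _ _
    have hm1pre : pvPreAux none (cs.dropWhile PySem.Chars.isspace) = true := by
      rw [preAux_dropWhile]; exact hpre
    rw [show listClean cs = listClean (cs.dropWhile PySem.Chars.isspace) from
      (listClean_dropWhile cs).symm]
    cases hm : cs.dropWhile PySem.Chars.isspace with
    | nil => rw [hm] at hm1pre; simp [pvPreAux] at hm1pre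
    | cons c rest =>
      have hcws : PySem.Chars.isspace c = false :=
        dropWhile_head_false (p := PySem.Chars.isspace) cs (by rw [hm]; rfl)
      have hrestlen : rest.length + 1 ≤ cs.length := by
        rw [hm] at hm1len; simpa using hm1len
      rw [hm] at hm1pre
      simp only [cleanA, lstrip_eq, hm]
      by_cases hc1 : c = '['
      · have hsome : pvPreAux (some ']') rest = true := by
          simpa [pvPreAux, hcws, hc1] using hm1pre
        rw [pvPreAux_some] at hsome
        cases hfk : pvFindIdx? ']' rest with
        | none => rw [hfk] at hsome; simp at hsome
        | some k =>
          rw [hfk] at hsome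
          have hcond1 : PySem.List.pyGet? (c :: rest) 0 = some '[' := by
            rw [pyGet?_zero]; simp [hc1]
          have hfind : PySem.Chars.find (c :: rest) [']'] = ((k : Int) + 1) := by
            rw [find_single]
            have : pvFindIdx? ']' (c :: rest) = some (k + 1) := by
              simp [pvFindIdx?, hc1, hfk]
            rw [this]
            show ((k + 1 : Nat) : Int) = (k : Int) + 1
            omega
          have hslice : PySem.List.slice (c :: rest) (some (PySem.Chars.find (c :: rest) [']'] + 1)) none
              = rest.drop (k + 1) := by
            rw [hfind]
            have : ((k : Int) + 1 + 1) = (((k + 2 : Nat) : Int)) := by omega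
            rw [this, slice_from_nat]
            simp [List.drop_succ_cons]
          have hr : cleanA f (rest.drop (k+1)) = listClean (rest.drop (k+1)) := by
            apply ih _ hsome
            have : (rest.drop (k+1)).length ≤ rest.length := by
              simp [List.length_drop]
            omega
          have hgood := head_good (rest.drop (k+1)) hsome
          rw [if_pos hcond1, hslice, hr]
          have hc2 : ¬ (PySem.List.pyGet? (listClean (rest.drop (k+1))) 0 = some '(') := by
            rw [pyGet?_zero]
            cases hh : (listClean (rest.drop (k+1))).head? with
            | none => simp
            | some d => simpa using (hgood d hh).2.2.1
          have hc3 : ¬ (PySem.List.pyGet? (listClean (rest.drop (k+1))) 0 = some '-') := by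
            rw [pyGet?_zero]
            cases hh : (listClean (rest.drop (k+1))).head? with
            | none => simp
            | some d => simpa using (hgood d hh).2.2.2
          rw [if_neg hc2, if_neg hc3]
          rw [listClean, if_neg (by simp [hcws]), if_pos hc1]
          simp [hfk]
      · by_cases hc2 : c = '('
        · have hsome : pvPreAux (some ')') rest = true := by
            simpa [pvPreAux, hcws, hc1, hc2] using hm1pre
          rw [pvPreAux_some] at hsome
          cases hfk : pvFindIdx? ')' rest with
          | none => rw [hfk] at hsome; simp at hsome
          | some k =>
            rw [hfk] at hsome
            have hcond1 : ¬ (PySem.List.pyGet? (c :: rest) 0 = some '[') := by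
              rw [pyGet?_zero]; simp [hc1]
            have hcond2 : PySem.List.pyGet? (c :: rest) 0 = some '(' := by
              rw [pyGet?_zero]; simp [hc2]
            have hfind : PySem.Chars.find (c :: rest) [')'] = ((k : Int) + 1) := by
              rw [find_single]
              have : pvFindIdx? ')' (c :: rest) = some (k + 1) := by
                simp [pvFindIdx?, hc2, hfk]
              rw [this]
              show ((k + 1 : Nat) : Int) = (k : Int) + 1
              omega
            have hslice : PySem.List.slice (c :: rest) (some (PySem.Chars.find (c :: rest) [')'] + 1)) none
                = rest.drop (k + 1) := by
              rw [hfind]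
              have : ((k : Int) + 1 + 1) = (((k + 2 : Nat) : Int)) := by omega
              rw [this, slice_from_nat]
              simp [List.drop_succ_cons]
            have hr : cleanA f (rest.drop (k+1)) = listClean (rest.drop (k+1)) := by
              apply ih _ hsome
              have : (rest.drop (k+1)).length ≤ rest.length := by
                simp [List.length_drop]
              omega
            have hgood := head_good (rest.drop (k+1)) hsome
            rw [if_neg hcond1, if_pos hcond2]
            rw [hslice, hr]
            have hc3 : ¬ (PySem.List.pyGet? (listClean (rest.drop (k+1))) 0 = some '-') := by
              rw [pyGet?_zero]
              cases hh : (listClean (rest.drop (k+1))).head? with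
              | none => simp
              | some d => simpa using (hgood d hh).2.2.2
            rw [if_neg hc3]
            rw [listClean, if_neg (by simp [hcws]), if_neg hc1, if_pos hc2]
            simp [hfk]
        · by_cases hc3 : c = '-'
          · have hsome : pvPreAux none rest = true := by
              simpa [pvPreAux, hcws, hc1, hc2, hc3] using hm1pre
            have hcond1 : ¬ (PySem.List.pyGet? (c :: rest) 0 = some '[') := by
              rw [pyGet?_zero]; simp [hc1]
            have hcond2 : ¬ (PySem.List.pyGet? (c :: rest) 0 = some '(') := by
              rw [pyGet?_zero]; simp [hc2]
            have hcond3 : PySem.List.pyGet? (c :: rest) 0 = some '-' := by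
              rw [pyGet?_zero]; simp [hc3]
            have hfind : PySem.Chars.find (c :: rest) ['-'] = (0 : Int) := by
              rw [find_single]
              have : pvFindIdx? '-' (c :: rest) = some 0 := by simp [pvFindIdx?, hc3]
              rw [this]
              show ((0 : Nat) : Int) = 0
              simp
            have hslice : PySem.List.slice (c :: rest) (some (PySem.Chars.find (c :: rest) ['-'] + 1)) none
                = rest := by
              rw [hfind]
              have : ((0 : Int) + 1) = (((1 : Nat) : Int)) := by norm_num
              rw [this, slice_from_nat]
              simp
            have hr : cleanA f rest = listClean rest := by
              apply ih _ hsome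
              omega
            rw [if_neg hcond1, if_neg hcond2, if_pos hcond3, hslice, hr]
            rw [listClean, if_neg (by simp [hcws]), if_neg hc1, if_neg hc2, if_pos hc3]
          · have hcond1 : ¬ (PySem.List.pyGet? (c :: rest) 0 = some '[') := by
              rw [pyGet?_zero]; simp [hc1]
            have hcond2 : ¬ (PySem.List.pyGet? (c :: rest) 0 = some '(') := by
              rw [pyGet?_zero]; simp [hc2]
            have hcond3 : ¬ (PySem.List.pyGet? (c :: rest) 0 = some '-') := by
              rw [pyGet?_zero]; simp [hc3]
            rw [if_neg hcond1, if_neg hcond2, if_neg hcond3]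
            rw [listClean, if_neg (by simp [hcws]), if_neg hc1, if_neg hc2, if_neg hc3]

theorem bLoop_drop (cs : List Char) : ∀ (fuel i : Nat), cs.length - i ≤ fuel →
    i ≤ cs.length → cs.drop (bLoop cs fuel i) = listClean (cs.drop i) := by
  intro fuel
  induction fuel with
  | zero =>
    intro i h1 h2
    have : i = cs.length := by omega
    subst this
    simp [bLoop, listClean]
  | succ fuel ih =>
    intro i h1 h2
    by_cases h : i < cs.length
    · have hdrop : cs.drop i = cs[i] :: cs.drop (i+1) := List.drop_eq_getElem_cons h
      rw [bLoop, dif_pos h]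
      by_cases hws : PySem.Chars.isspace cs[i]
      · rw [if_pos hws, ih (i+1) (by omega) (by omega), hdrop]
        rw [listClean, if_pos hws]
      · rw [if_neg hws]
        by_cases hc1 : cs[i] = '['
        · rw [if_pos hc1]
          have hffeq : PySem.Chars.findFrom cs [']'] (i : Int) =
              (if PySem.Chars.find (cs.drop i) [']'] = -1 then -1
               else (i : Int) + PySem.Chars.find (cs.drop i) [']']) :=
            PySem.Chars.findFrom_natCast cs [']'] i (by omega)
          have hfidx : pvFindIdx? ']' (cs.drop i) =
              (pvFindIdx? ']' (cs.drop (i+1))).map (· + 1) := by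
            rw [hdrop]
            simp [pvFindIdx?, hc1]
          cases hfk : pvFindIdx? ']' (cs.drop (i+1)) with
          | none =>
            have hfind : PySem.Chars.find (cs.drop i) [']'] = -1 := by
              rw [find_single, hfidx, hfk]
              rfl
            rw [hffeq, if_pos hfind, if_pos rfl, hdrop]
            rw [listClean, if_neg hws, if_pos hc1]
            simp [hfk]
          | some k =>
            have hfind : PySem.Chars.find (cs.drop i) [']'] = ((k : Int) + 1) := by
              rw [find_single, hfidx, hfk]; rfl
            have hklen : k < (cs.drop (i+1)).length := by
              have h' := (pvFindIdx?_some ']' (cs.drop (i+1)) k hfk).1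
              exact (List.getElem?_eq_some_iff.mp h').1
            have hj : PySem.Chars.findFrom cs [']'] (i : Int) = ((i + k + 1 : Nat) : Int) := by
              rw [hffeq, if_neg (by rw [hfind]; omega), hfind]
              push_cast; ring
            rw [hj]
            rw [if_neg (by omega)]
            have htoNat : ((i + k + 1 : Nat) : Int).toNat + 1 = i + k + 2 := by omega
            rw [htoNat]
            have hlen2 : i + k + 2 ≤ cs.length := by
              simp [List.length_drop] at hklen; omega
            rw [ih (i + k + 2) (by omega) hlen2]
            rw [hdrop, listClean, if_neg hws, if_pos hc1]
            simp only [hfk]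
            rw [List.drop_drop]
            congr 1
            have he : i + k + 2 = i + 1 + (k + 1) := by omega
            rw [he]
        · rw [if_neg hc1]
          by_cases hc2 : cs[i] = '('
          · rw [if_pos hc2]
            have hffeq : PySem.Chars.findFrom cs [')'] (i : Int) =
                (if PySem.Chars.find (cs.drop i) [')'] = -1 then -1
                 else (i : Int) + PySem.Chars.find (cs.drop i) [')']) :=
              PySem.Chars.findFrom_natCast cs [')'] i (by omega)
            have hfidx : pvFindIdx? ')' (cs.drop i) =
                (pvFindIdx? ')' (cs.drop (i+1))).map (· + 1) := by
              rw [hdrop]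
              simp [pvFindIdx?, hc2]
            cases hfk : pvFindIdx? ')' (cs.drop (i+1)) with
            | none =>
              have hfind : PySem.Chars.find (cs.drop i) [')'] = -1 := by
                rw [find_single, hfidx, hfk]
                rfl
              rw [hffeq, if_pos hfind, if_pos rfl, hdrop]
              rw [listClean, if_neg hws, if_neg hc1, if_pos hc2]
              simp [hfk]
            | some k =>
              have hfind : PySem.Chars.find (cs.drop i) [')'] = ((k : Int) + 1) := by
                rw [find_single, hfidx, hfk]; rfl
              have hklen : k < (cs.drop (i+1)).length := by
                have h' := (pvFindIdx?_some ')' (cs.drop (i+1)) k hfk).1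
                exact (List.getElem?_eq_some_iff.mp h').1
              have hj : PySem.Chars.findFrom cs [')'] (i : Int) = ((i + k + 1 : Nat) : Int) := by
                rw [hffeq, if_neg (by rw [hfind]; omega), hfind]
                push_cast; ring
              rw [hj]
              rw [if_neg (by omega)]
              have htoNat : ((i + k + 1 : Nat) : Int).toNat + 1 = i + k + 2 := by omega
              rw [htoNat]
              have hlen2 : i + k + 2 ≤ cs.length := by
                simp [List.length_drop] at hklen; omega
              rw [ih (i + k + 2) (by omega) hlen2]
              rw [hdrop, listClean, if_neg hws, if_neg hc1, if_pos hc2]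
              simp only [hfk]
              rw [List.drop_drop]
              congr 1
              have he : i + k + 2 = i + 1 + (k + 1) := by omega
              rw [he]
          · rw [if_neg hc2]
            by_cases hc3 : cs[i] = '-'
            · rw [if_pos hc3, ih (i+1) (by omega) (by omega), hdrop]
              rw [listClean, if_neg hws, if_neg hc1, if_neg hc2, if_pos hc3]
            · rw [if_neg hc3, hdrop]
              rw [listClean, if_neg hws, if_neg hc1, if_neg hc2, if_neg hc3]
    · have : i = cs.length := by omega
      subst this
      rw [bLoop, dif_neg h]
      simp [listClean]

-- ===== VERDICT (by name: the statement is the Claim_ definition above) =====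
theorem cleanMovieName_leftSide_spec : Claim_equal_cleanMovieName_leftSide := by
  unfold Claim_equal_cleanMovieName_leftSide
  intro s _ hpre
  unfold Spec_cleanMovieName_leftSide
  unfold cleanMovieName_leftSide cleanMovieName_leftSide_alt
  simp only []
  congr 1
  rw [cleanA_eq (s.toList.length + 1) s.toList hpre (by omega)]
  rw [slice_from_nat]
  rw [bLoop_drop s.toList s.toList.length 0 (by omega) (by omega)]
  simp
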